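-- pv_equiv track=rewrite | github.com/ninepig/leecode_dd_2024 | zAmazon/oa/zmethodExplained/wareHouseSuitableLocation.py | higherBound
-- ===== SOURCE A (Python) =====
-- def isValid(center, d, location):
--     res = 0
--     for item in center:
--         res += 2 * abs(location - item)
--         if res > d:
--             return False
--     return True
--
-- def higherBound(center, d, left, right):
--     while left + 1 < right:
--         mid = left + (right - left) // 2
--         if isValid(center, d, mid):
--             left = mid;
--         else:
--             right = mid
--     if isValid(center, d, left):
--         return left
--     if isValid(center, d, right):
--         return right
--     return -1
-- ===== SOURCE B (Python) =====
-- def higherBound(center, d, left, right):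
--     cs = sorted(center)
--     n = len(cs)
--     pre = [0]
--     s = 0
--     for c in cs:
--         s += c
--         pre.append(s)
--     total = pre[n]
--
--     def cost(loc):
--         # k = number of elements of cs strictly below loc (binary search on sorted cs)
--         lo, hi = 0, n
--         while lo < hi:
--             m = (lo + hi) // 2
--             if cs[m] < loc:
--                 lo = m + 1
--             else:
--                 hi = m
--         k = lo
--         return 2 * (loc * k - pre[k] + (total - pre[k]) - loc * (n - k))
--
--     while left + 1 < right:
--         mid = left + (right - left) // 2
--         if cost(mid) <= d:
--             left = mid
--         else:
--             right = mid
--     if cost(left) <= d: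
--         return left
--     if cost(right) <= d:
--         return right
--     return -1
-- ===== Notes on version B (the rewrite author's own statement) =====
-- stated objective: alternative
-- what changed: B replaces A's per-probe O(n) scan of center by a one-time sort with prefix sums and evaluates the weighted abs-distance sum of each probed location via a hand-rolled bisect on the sorted array, so the inner scan disappears; A's early-exit scan is often very cheap in practice, so this trades a different cost profile rather than raw speed.
-- intended difference: On empty center with d < 0, A's early-exit isValid never runs its loop and vacuously reports every location valid, so A returns the final binary-search position while B correctly notes the cost 0 exceeds the (negative) budget d and returns -1, the intended 'no valid location' answer; D_ excludes the windows where that final position is itself -1, where the two agree. — e.g. on higherBound([], -1, 0, 1): A returns 0, B returns -1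
import Mathlib
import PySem

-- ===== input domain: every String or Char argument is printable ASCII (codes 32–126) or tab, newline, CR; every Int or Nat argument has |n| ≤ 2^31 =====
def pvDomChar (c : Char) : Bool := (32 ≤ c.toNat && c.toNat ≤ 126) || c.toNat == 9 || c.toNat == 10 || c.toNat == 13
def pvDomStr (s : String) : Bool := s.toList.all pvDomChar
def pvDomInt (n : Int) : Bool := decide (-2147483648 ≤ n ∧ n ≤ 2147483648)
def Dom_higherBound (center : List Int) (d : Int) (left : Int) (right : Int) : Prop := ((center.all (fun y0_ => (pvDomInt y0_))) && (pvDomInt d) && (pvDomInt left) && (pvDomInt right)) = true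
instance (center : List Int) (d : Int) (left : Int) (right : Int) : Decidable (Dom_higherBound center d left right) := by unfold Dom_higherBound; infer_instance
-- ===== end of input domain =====

-- B replaces A's per-probe scan of center by a one-time sort + prefix sums with a
-- binary-searched cost evaluation (objective: alternative algorithm, not measured faster).

-- ===== PORT A =====
-- isValid's for-loop with early return, as structural recursion over the list with accumulator res
def pvIsValidLoop (d location : Int) : List Int → Int → Bool
  | [], _ => true
  | item :: rest, res =>
      let res' := res + 2 * |location - item|
      if res' > d then false else pvIsValidLoop d location rest res'

def pvIsValid (center : List Int) (d location : Int) : Bool :=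
  pvIsValidLoop d location center 0

-- A's while-loop: returns the final (left, right); the interval shrinks each iteration,
-- so fuel = (right-left).toNat + 1 is a pure totality guard that is never exhausted
def pvHBLoop (center : List Int) (d : Int) : Nat → Int → Int → Int × Int
  | 0, left, right => (left, right)
  | fuel + 1, left, right =>
    if left + 1 < right then
      let mid := left + PySem.Int.floordiv (right - left) 2
      if pvIsValid center d mid then pvHBLoop center d fuel mid right
      else pvHBLoop center d fuel left mid
    else (left, right)

def higherBound (center : List Int) (d : Int) (left : Int) (right : Int) : Int :=
  let p := pvHBLoop center d ((right - left).toNat + 1) left right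
  if pvIsValid center d p.1 then p.1
  else if pvIsValid center d p.2 then p.2
  else -1

-- ===== PORT B =====
-- hand-written bisect_left loop of Source B; cs[m] is ported as getD m 0, exact because
-- every call keeps lo < hi ≤ len(cs), so the index m is always in range
-- fuel = hi - lo + 1 at the call site is a pure totality guard (hi - lo shrinks each turn)
def altBisect (cs : List Int) (loc : Int) : Nat → Nat → Nat → Nat
  | 0, lo, _ => lo
  | fuel + 1, lo, hi =>
    if lo < hi then
      let m := (lo + hi) / 2      -- (lo+hi)//2 on nonnegative ints = Nat division
      if cs.getD m 0 < loc then altBisect cs loc fuel (m + 1) hi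
      else altBisect cs loc fuel lo m
    else lo

-- the pre/s accumulation loop of Source B: returns (pre, s)
def altPre (cs : List Int) : List Int × Int :=
  cs.foldl (fun ps c => (ps.1 ++ [ps.2 + c], ps.2 + c)) ([0], 0)

-- cost(loc); pre[k] and pre[n] ported as getD, exact because k ≤ n < len(pre)
def altCost (cs pre : List Int) (total : Int) (n : Nat) (loc : Int) : Int :=
  let k := altBisect cs loc (n + 1) 0 n
  2 * (loc * (k : Int) - pre.getD k 0 + (total - pre.getD k 0) - loc * ((n : Int) - (k : Int)))

-- same totality guard as A's loop: fuel = (right-left).toNat + 1, never exhausted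
def altLoop (cs pre : List Int) (total : Int) (n : Nat) (d : Int) : Nat → Int → Int → Int × Int
  | 0, left, right => (left, right)
  | fuel + 1, left, right =>
    if left + 1 < right then
      let mid := left + PySem.Int.floordiv (right - left) 2
      if altCost cs pre total n mid ≤ d then altLoop cs pre total n d fuel mid right
      else altLoop cs pre total n d fuel left mid
    else (left, right)

def higherBound_alt (center : List Int) (d : Int) (left : Int) (right : Int) : Int :=
  let cs := PySem.List.sorted center (fun x => x) false
  let n := cs.length
  let pre := (altPre cs).1
  let total := pre.getD n 0
  let p := altLoop cs pre total n d ((right - left).toNat + 1) left right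
  if altCost cs pre total n p.1 ≤ d then p.1
  else if altCost cs pre total n p.2 ≤ d then p.2
  else -1

-- ===== PRECONDITION & SPEC =====
-- On empty center with d < 0, A's early-exit isValid never runs its loop and vacuously
-- reports every location valid, so A returns the final binary-search position (the last
-- conjunct of D_ just excludes the windows where that position happens to be -1 too),
-- while B correctly notes the cost 0 exceeds the (negative) budget d and returns -1,
-- the intended 'no valid location' answer.
def D_higherBound (center : List Int) (d : Int) (left : Int) (right : Int) : Prop :=
  center = [] ∧ d < 0 ∧ (if left + 1 < right then right ≠ 0 else left ≠ -1)
instance (center : List Int) (d : Int) (left : Int) (right : Int) : Decidable (D_higherBound center d left right) := by unfold D_higherBound; infer_instance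

def Spec_higherBound (center : List Int) (d : Int) (left : Int) (right : Int) (out : Int) : Prop := ¬ D_higherBound center d left right → out = higherBound_alt center d left right
instance (center : List Int) (d : Int) (left : Int) (right : Int) (out : Int) : Decidable (Spec_higherBound center d left right out) := by unfold Spec_higherBound; infer_instance

def pvDiffWitness_higherBound : List Int × Int × Int × Int := ([], -1, 0, 1)
def pvDiffWitnessOut_higherBound : Int × Int := (0, -1)

-- ===== CLAIM (what is proved, stated in full; the proofs are below) =====
def Claim_unchanged_higherBound : Prop := ∀ (center : List Int) (d : Int) (left : Int) (right : Int), Dom_higherBound center d left right → Spec_higherBound center d left right (higherBound center d left right)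
def Claim_exact_higherBound : Prop := ∀ (center : List Int) (d : Int) (left : Int) (right : Int), Dom_higherBound center d left right → D_higherBound center d left right → higherBound center d left right ≠ higherBound_alt center d left right
def Claim_changed_higherBound : Prop := Dom_higherBound (pvDiffWitness_higherBound.1) (pvDiffWitness_higherBound.2.1) (pvDiffWitness_higherBound.2.2.1) (pvDiffWitness_higherBound.2.2.2) ∧ D_higherBound (pvDiffWitness_higherBound.1) (pvDiffWitness_higherBound.2.1) (pvDiffWitness_higherBound.2.2.1) (pvDiffWitness_higherBound.2.2.2) ∧ higherBound (pvDiffWitness_higherBound.1) (pvDiffWitness_higherBound.2.1) (pvDiffWitness_higherBound.2.2.1) (pvDiffWitness_higherBound.2.2.2) = pvDiffWitnessOut_higherBound.1 ∧ higherBound_alt (pvDiffWitness_higherBound.1) (pvDiffWitness_higherBound.2.1) (pvDiffWitness_higherBound.2.2.1) (pvDiffWitness_higherBound.2.2.2) = pvDiffWitnessOut_higherBound.2 ∧ pvDiffWitnessOut_higherBound.1 ≠ pvDiffWitnessOut_higherBound.2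

-- ===== LEMMAS AND PROOFS =====

-- the weighted cost A's isValid accumulates
def pvCostSum (center : List Int) (loc : Int) : Int :=
  (center.map (fun c => 2 * |loc - c|)).sum

lemma pvCostSum_nonneg (center : List Int) (loc : Int) : 0 ≤ pvCostSum center loc := by
  apply List.sum_nonneg
  intro x hx
  simp only [List.mem_map] at hx
  obtain ⟨c, _, rfl⟩ := hx
  positivity

lemma pvIsValidLoop_eq (d loc : Int) : ∀ (items : List Int) (res : Int), res ≤ d →
    pvIsValidLoop d loc items res = decide (res + pvCostSum items loc ≤ d) := by
  intro items
  induction items with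
  | nil => intro res h; simp [pvIsValidLoop, pvCostSum, h]
  | cons c rest ih =>
      intro res h
      simp only [pvIsValidLoop, pvCostSum, List.map_cons, List.sum_cons]
      by_cases hgt : res + 2 * |loc - c| > d
      · have hrest : 0 ≤ pvCostSum rest loc := pvCostSum_nonneg rest loc
        simp only [pvCostSum] at hrest
        simp only [if_pos hgt]
        have : ¬ (res + (2 * |loc - c| + (rest.map (fun c => 2 * |loc - c|)).sum) ≤ d) := by
          omega
        simp [this]
      · simp only [if_neg hgt]
        rw [ih (res + 2 * |loc - c|) (by omega)]
        simp only [pvCostSum]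
        rw [decide_eq_decide]
        omega

lemma pvIsValid_char (center : List Int) (d loc : Int) (h : center ≠ [] ∨ 0 ≤ d) :
    pvIsValid center d loc = decide (pvCostSum center loc ≤ d) := by
  by_cases hd : 0 ≤ d
  · have h0 := pvIsValidLoop_eq d loc center 0 hd
    rw [pvIsValid, h0, zero_add]
  · rcases h with hc | hc
    · cases center with
      | nil => exact absurd rfl hc
      | cons c rest =>
          have h1 : 0 + 2 * |loc - c| > d := by
            have : 0 ≤ |loc - c| := abs_nonneg _
            omega
          have h2 : ¬ (pvCostSum (c :: rest) loc ≤ d) := by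
            have := pvCostSum_nonneg (c :: rest) loc
            omega
          rw [pvIsValid, pvIsValidLoop]
          simp only [if_pos h1]
          simp [h2]
    · omega

-- characterisation of Source B's prefix list
lemma altPre_char (cs : List Int) :
    altPre cs = ((List.range (cs.length + 1)).map (fun i => (cs.take i).sum), cs.sum) := by
  induction cs using List.reverseRecOn with
  | nil => simp [altPre]
  | append_singleton xs x ih =>
      rw [altPre, List.foldl_append]
      rw [show xs.foldl (fun ps c => (ps.1 ++ [ps.2 + c], ps.2 + c)) ([0], 0) = altPre xs from rfl, ih]
      simp only [List.foldl_cons, List.foldl_nil, Prod.mk.injEq]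
      refine ⟨?_, by simp⟩
      · rw [show (xs ++ [x]).length = xs.length + 1 by simp]
        conv_rhs => rw [List.range_succ, List.map_append]
        congr 1
        · refine (List.map_congr_left ?_)
          intro i hi
          rw [List.mem_range] at hi
          rw [List.take_append_of_le_length (by omega)]
        · simp

lemma altPre_getD (cs : List Int) (k : Nat) (hk : k ≤ cs.length) :
    (altPre cs).1.getD k 0 = (cs.take k).sum := by
  rw [altPre_char]
  have hlt : k < ((List.range (cs.length + 1)).map (fun i => (cs.take i).sum)).length := by
    simp; omega
  rw [List.getD_eq_getElem _ _ hlt]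
  simp

-- bisect invariant, by induction on the (sufficient) fuel
lemma altBisect_spec (cs : List Int) (loc : Int) (hs : cs.Pairwise (· ≤ ·)) :
    ∀ (fuel lo hi : Nat), hi - lo < fuel → lo ≤ hi → hi ≤ cs.length →
    (∀ j, j < lo → cs.getD j 0 < loc) →
    (∀ j, hi ≤ j → j < cs.length → loc ≤ cs.getD j 0) →
    altBisect cs loc fuel lo hi ≤ cs.length ∧
    (∀ j, j < altBisect cs loc fuel lo hi → cs.getD j 0 < loc) ∧
    (∀ j, altBisect cs loc fuel lo hi ≤ j → j < cs.length → loc ≤ cs.getD j 0) := by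
  have hmono : ∀ i j, i ≤ j → j < cs.length → cs.getD i 0 ≤ cs.getD j 0 := by
    intro i j hij hj
    rcases Nat.eq_or_lt_of_le hij with rfl | hlt
    · exact le_rfl
    · rw [List.getD_eq_getElem _ _ (by omega), List.getD_eq_getElem _ _ hj]
      exact List.pairwise_iff_getElem.mp hs i j (by omega) hj hlt
  intro fuel
  induction fuel with
  | zero => intro lo hi hf; omega
  | succ fuel ih =>
      intro lo hi hf hle hhi inv1 inv2
      by_cases h : lo < hi
      · have hm1 : lo ≤ (lo + hi) / 2 := by omega
        have hm2 : (lo + hi) / 2 < hi := by omega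
        simp only [altBisect, if_pos h]
        by_cases hc : cs.getD ((lo + hi) / 2) 0 < loc
        · rw [if_pos hc]
          apply ih ((lo + hi) / 2 + 1) hi (by omega) (by omega) hhi
          · intro j hj
            calc cs.getD j 0 ≤ cs.getD ((lo + hi) / 2) 0 := hmono _ _ (by omega) (by omega)
              _ < loc := hc
          · exact inv2
        · rw [if_neg hc]
          apply ih lo ((lo + hi) / 2) (by omega) hm1 (by omega) inv1
          intro j hj hjlen
          calc loc ≤ cs.getD ((lo + hi) / 2) 0 := le_of_not_gt hc
            _ ≤ cs.getD j 0 := hmono _ _ hj hjlen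
      · simp only [altBisect, if_neg h]
        exact ⟨by omega, inv1, fun j hj hjl => inv2 j (by omega) hjl⟩

lemma sum_map_two_mul_sub_left (l : List Int) (loc : Int) :
    (l.map (fun c => 2 * (loc - c))).sum = 2 * ((l.length : Int) * loc - l.sum) := by
  induction l with
  | nil => simp
  | cons c t ih => simp [ih]; ring

lemma sum_map_two_mul_sub_right (l : List Int) (loc : Int) :
    (l.map (fun c => 2 * (c - loc))).sum = 2 * (l.sum - (l.length : Int) * loc) := by
  induction l with
  | nil => simp
  | cons c t ih => simp [ih]; ring

-- cost = weighted abs-distance sum, on the sorted list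
lemma altCost_eq (cs : List Int) (loc : Int) (hs : cs.Pairwise (· ≤ ·)) :
    altCost cs (altPre cs).1 ((altPre cs).1.getD cs.length 0) cs.length loc
      = pvCostSum cs loc := by
  obtain ⟨hk, hlt, hge⟩ := altBisect_spec cs loc hs (cs.length + 1) 0 cs.length (by omega)
    (by omega) le_rfl (by omega) (by omega)
  set k := altBisect cs loc (cs.length + 1) 0 cs.length with hkdef
  rw [show altCost cs (altPre cs).1 ((altPre cs).1.getD cs.length 0) cs.length loc =
      2 * (loc * (k : Int) - (altPre cs).1.getD k 0
        + ((altPre cs).1.getD cs.length 0 - (altPre cs).1.getD k 0)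
        - loc * ((cs.length : Int) - (k : Int))) from rfl]
  unfold pvCostSum
  rw [altPre_getD cs k hk, altPre_getD cs cs.length le_rfl, List.take_length]
  conv_rhs => rw [← List.take_append_drop k cs]
  rw [List.map_append, List.sum_append]
  have htake : (cs.take k).map (fun c => 2 * |loc - c|) = (cs.take k).map (fun c => 2 * (loc - c)) := by
    apply List.map_congr_left
    intro c hc
    rw [List.mem_take_iff_getElem] at hc
    obtain ⟨j, hj, rfl⟩ := hc
    have hjk : j < k := by omega
    have := hlt j hjk
    rw [List.getD_eq_getElem _ _ (by omega)] at this
    rw [abs_of_pos (by omega)]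
  have hdrop : (cs.drop k).map (fun c => 2 * |loc - c|) = (cs.drop k).map (fun c => 2 * (c - loc)) := by
    apply List.map_congr_left
    intro c hc
    rw [List.mem_drop_iff_getElem] at hc
    obtain ⟨j, hj, rfl⟩ := hc
    have := hge (k + j) (by omega) (by omega)
    rw [List.getD_eq_getElem _ _ (by omega)] at this
    rw [show cs[k + j] = cs[k + j]'(by omega) from rfl] at this
    rw [abs_of_nonpos (by omega), neg_sub]
  rw [htake, hdrop, sum_map_two_mul_sub_left, sum_map_two_mul_sub_right]
  have hlt' : (cs.take k).length = k := by rw [List.length_take]; omega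
  have hld : (cs.drop k).length = cs.length - k := List.length_drop
  have hsum : (cs.drop k).sum = cs.sum - (cs.take k).sum := by
    have := List.take_append_drop k cs
    have h2 : (cs.take k).sum + (cs.drop k).sum = cs.sum := by
      rw [← List.sum_append, this]
    omega
  rw [hlt', hld, hsum]
  have : ((cs.length - k : Nat) : Int) = (cs.length : Int) - (k : Int) := by
    omega
  rw [this]
  ring

-- the two loops agree whenever the two validity tests agree
lemma loop_eq (center cs pre : List Int) (total : Int) (n : Nat) (d : Int)
    (hv : ∀ loc, (altCost cs pre total n loc ≤ d) ↔ (pvIsValid center d loc = true)) :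
    ∀ (fuel : Nat) (l r : Int),
      altLoop cs pre total n d fuel l r = pvHBLoop center d fuel l r := by
  intro fuel
  induction fuel with
  | zero => intro l r; rfl
  | succ fuel ih =>
      intro l r
      simp only [altLoop, pvHBLoop]
      by_cases h : l + 1 < r
      · rw [if_pos h, if_pos h]
        by_cases hvalid : pvIsValid center d (l + PySem.Int.floordiv (r - l) 2) = true
        · rw [if_pos ((hv _).mpr hvalid), if_pos hvalid]
          exact ih _ _
        · rw [if_neg (fun hc => hvalid ((hv _).mp hc)), if_neg hvalid]
          exact ih _ _
      · rw [if_neg h, if_neg h]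

-- A's loop on an empty center: every probe is valid, so left climbs to right - 1
lemma pvHBLoop_nil (d : Int) :
    ∀ (fuel : Nat) (l r : Int), (r - l).toNat < fuel →
      pvHBLoop [] d fuel l r = (if l + 1 < r then (r - 1, r) else (l, r)) := by
  intro fuel
  induction fuel with
  | zero => intro l r h; omega
  | succ fuel ih =>
      intro l r h
      by_cases hc : l + 1 < r
      · have hq : PySem.Int.floordiv (r - l) 2 = (r - l) / 2 :=
          PySem.Int.floordiv_eq_ediv_of_pos (by omega)
        simp only [pvHBLoop, if_pos hc, pvIsValid, pvIsValidLoop]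
        rw [ih (l + PySem.Int.floordiv (r - l) 2) r (by rw [hq]; omega)]
        rw [hq]
        simp only [if_true]
        by_cases h2 : l + (r - l) / 2 + 1 < r
        · rw [if_pos h2]
        · rw [if_neg h2, show l + (r - l) / 2 = r - 1 by omega]
      · simp [pvHBLoop, hc]

lemma higherBound_nil (d l r : Int) :
    higherBound [] d l r = (if l + 1 < r then r - 1 else l) := by
  simp only [higherBound]
  rw [pvHBLoop_nil d _ l r (by omega)]
  by_cases hc : l + 1 < r
  · rw [if_pos hc, if_pos hc]
    simp [pvIsValid, pvIsValidLoop]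
  · rw [if_neg hc, if_neg hc]
    simp [pvIsValid, pvIsValidLoop]

lemma higherBound_alt_nil (d l r : Int) (hd : d < 0) :
    higherBound_alt [] d l r = -1 := by
  have hc : ∀ loc, altCost [] (altPre []).1 ((altPre []).1.getD 0 0) 0 loc = 0 := by
    intro loc
    simp [altCost, altBisect, altPre]
  show (if altCost [] (altPre []).1 ((altPre []).1.getD 0 0) 0 _ ≤ d then _
        else if altCost [] (altPre []).1 ((altPre []).1.getD 0 0) 0 _ ≤ d then _ else (-1 : Int)) = -1
  rw [hc, hc, if_neg (by omega), if_neg (by omega)]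

-- ===== VERDICT (by name: the statement is the Claim_ definition above) =====
theorem higherBound_spec : Claim_unchanged_higherBound := by
  intro center d left right hdom hnd
  show higherBound center d left right = higherBound_alt center d left right
  by_cases hd0 : center = [] ∧ d < 0
  · obtain ⟨rfl, hd⟩ := hd0
    have hcond : ¬(if left + 1 < right then right ≠ 0 else left ≠ -1) := fun hcnd =>
      hnd ⟨rfl, hd, hcnd⟩
    rw [higherBound_nil, higherBound_alt_nil _ _ _ hd]
    by_cases h1 : left + 1 < right
    · rw [if_pos h1]
      rw [if_pos h1] at hcond
      omega
    · rw [if_neg h1]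
      rw [if_neg h1] at hcond
      omega
  · simp only [higherBound, higherBound_alt]
    set cs := PySem.List.sorted center (fun x => x) false with hcs
    have hs : cs.Pairwise (· ≤ ·) := PySem.List.sorted_pairwise center (fun x => x)
    have hperm : cs.Perm center := PySem.List.sorted_perm center (fun x => x) false
    have hne : center ≠ [] ∨ 0 ≤ d := by
      by_cases hc : center = []
      · right
        by_contra hlt
        exact hd0 ⟨hc, by omega⟩
      · exact Or.inl hc
    have hv : ∀ loc, (altCost cs (altPre cs).1 ((altPre cs).1.getD cs.length 0) cs.length loc ≤ d)
        ↔ (pvIsValid center d loc = true) := by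
      intro loc
      rw [altCost_eq cs loc hs]
      have hsum : pvCostSum cs loc = pvCostSum center loc := (hperm.map _).sum_eq
      rw [hsum, pvIsValid_char center d loc hne]
      simp
    have hloop := loop_eq center cs (altPre cs).1 ((altPre cs).1.getD cs.length 0) cs.length d hv
      ((right - left).toNat + 1) left right
    rw [hloop]
    by_cases h1 : pvIsValid center d (pvHBLoop center d ((right - left).toNat + 1) left right).1
    · rw [if_pos h1, if_pos ((hv _).mpr h1)]
    · rw [if_neg h1, if_neg (fun hc => h1 ((hv _).mp hc))]
      by_cases h2 : pvIsValid center d (pvHBLoop center d ((right - left).toNat + 1) left right).2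
      · rw [if_pos h2, if_pos ((hv _).mpr h2)]
      · rw [if_neg h2, if_neg (fun hc => h2 ((hv _).mp hc))]

theorem higherBound_tight : Claim_exact_higherBound := by
  intro center d left right hdom hD
  obtain ⟨rfl, hd, hcond⟩ := hD
  rw [higherBound_nil d left right, higherBound_alt_nil d left right hd]
  split_ifs at hcond ⊢ with h1
  · omega
  · omega

theorem higherBound_changed : Claim_changed_higherBound := by
  unfold Claim_changed_higherBound
  exact ⟨by decide, by decide, by decide, by decide, by decide⟩
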